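-- pv_equiv track=rewrite | github.com/tupkalenkodi/DONE | Final_31_January_2018/keypad_DONE.py | key_count
-- ===== SOURCE A (Python) =====
-- def mobile_keys(l):
--     res_dict = {}
--     for i in range(len(l)):
--         counter = 1
--         for j in l[i]:
--             res_dict[j] = (i+2, counter)
--             counter += 1
--     return res_dict
--
-- def key_count(l, sms):
--     number = 0
--     dict = mobile_keys(l)
--     for i in sms:
--         if i != ' ':
--             number += dict[i][1]
--         else:
--             number += 1
--     return number
-- ===== SOURCE B (Python) =====
-- def key_count(l, sms):
--     total = 0
--     for ch in sms:
--         if ch == ' ':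
--             total += 1
--             continue
--         for row in reversed(l):
--             pos = row.rfind(ch)
--             if pos != -1:
--                 total += pos + 1
--                 break
--         else:
--             raise KeyError(ch)
--     return total
-- ===== Notes on version B (the rewrite author's own statement) =====
-- stated objective: alternative
-- what changed: B drops A's precomputed keypad dictionary entirely: per sms character it scans the keypad rows in reverse with str.rfind, so the last occurrence of a character wins exactly as with A's dict overwrites.
import Mathlib
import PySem

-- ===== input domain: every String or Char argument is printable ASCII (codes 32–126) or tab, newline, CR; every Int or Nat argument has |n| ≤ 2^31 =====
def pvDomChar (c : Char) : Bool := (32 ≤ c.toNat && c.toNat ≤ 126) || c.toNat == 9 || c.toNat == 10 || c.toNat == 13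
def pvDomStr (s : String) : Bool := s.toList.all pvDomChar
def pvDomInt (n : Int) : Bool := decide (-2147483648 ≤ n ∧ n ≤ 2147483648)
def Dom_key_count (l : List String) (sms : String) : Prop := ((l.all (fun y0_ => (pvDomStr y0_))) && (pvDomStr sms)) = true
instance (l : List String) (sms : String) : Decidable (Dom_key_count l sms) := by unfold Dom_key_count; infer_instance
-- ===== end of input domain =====

-- B drops A's precomputed dict: per character it scans the keypad rows in reverse with rfind
-- (last occurrence wins, exactly A's dict-overwrite semantics); an alternative, dictionary-free decomposition.

-- ===== PORT A =====
-- mobile_keys: dict built row by row; l[i] is always in range, so the .getD "" default is never used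
def mobileKeys (l : List String) : PySem.Dict Char (Int × Int) :=
  (PySem.List.pyRange 0 (l.length) 1).foldl
    (fun d i =>
      ((((PySem.List.pyGet? l i).getD "").toList.foldl
          (fun (p : PySem.Dict Char (Int × Int) × Int) j => (p.1.insert j (i + 2, p.2), p.2 + 1))
          (d, 1)).1))
    PySem.Dict.empty

-- dict[i] raises KeyError on a miss (excluded by Pre_); the .getD (0,0) default is never used on Pre_
def key_count (l : List String) (sms : String) : Int :=
  sms.toList.foldl
    (fun number i =>
      if i ≠ ' ' then number + (((mobileKeys l).get? i).getD (0, 0)).2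
      else number + 1)
    0

-- ===== PORT B =====
-- the 'for row in reversed(l)' loop of Source B: none = the for/else 'raise KeyError' (excluded by Pre_)
def pressesAux (rows : List String) (c : Char) : Option Int :=
  match rows with
  | [] => none
  | row :: rest =>
    let pos := PySem.Str.rfind row (String.ofList [c])
    if pos ≠ -1 then some (pos + 1) else pressesAux rest c

def key_count_alt (l : List String) (sms : String) : Int :=
  sms.toList.foldl
    (fun total ch =>
      if ch = ' ' then total + 1
      else total + (pressesAux l.reverse ch).getD 0)
    0

-- ===== PRECONDITION & SPEC =====
-- Pre_ excludes exactly the inputs on which A raises KeyError: a non-space sms character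
-- that occurs in no keypad row.
def Pre_key_count (l : List String) (sms : String) : Prop :=
  (sms.toList.all (fun c => c == ' ' || l.any (fun row => row.toList.contains c))) = true
instance (l : List String) (sms : String) : Decidable (Pre_key_count l sms) := by
  unfold Pre_key_count; infer_instance

def pvWitness_key_count : List String × String := (["adg", "beh", "cfi"], "hi bag")

def Spec_key_count (l : List String) (sms : String) (out : Int) : Prop := out = key_count_alt l sms
instance (l : List String) (sms : String) (out : Int) : Decidable (Spec_key_count l sms out) := by unfold Spec_key_count; infer_instance

-- ===== CLAIM (what is proved, stated in full; the proofs are below) =====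
def Claim_equal_key_count : Prop := ∀ (l : List String) (sms : String), Dom_key_count l sms → Pre_key_count l sms → Spec_key_count l sms (key_count l sms)

-- ===== LEMMAS AND PROOFS =====

-- index of the LAST occurrence of c in cs (none if absent)
def lastIdx? : List Char → Char → Option Nat
  | [], _ => none
  | a :: t, c =>
    match lastIdx? t c with
    | some k => some (k + 1)
    | none => if a = c then some 0 else none

lemma lastIdx?_append_singleton (t : List Char) (a c : Char) :
    lastIdx? (t ++ [a]) c = if a = c then some t.length else lastIdx? t c := by
  induction t with
  | nil => simp [lastIdx?]
  | cons b t ih =>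
    simp only [List.cons_append, lastIdx?, ih]
    by_cases h : a = c
    · simp [h]
    · simp [h]

lemma isPrefixOf_singleton_drop (s : List Char) (c : Char) (i : Nat) :
    [c].isPrefixOf (s.drop i) = true ↔ s[i]? = some c := by
  rw [List.isPrefixOf_iff_prefix, ← List.head?_drop]
  cases s.drop i <;> simp [List.cons_prefix_cons, eq_comm]

lemma rfind_go_spec (s : List Char) (c : Char) (n : Nat) :
    PySem.Chars.rfind.go s [c] n =
      (match lastIdx? (s.take (n + 1)) c with
       | some k => (k : Int)
       | none => -1) := by
  induction n with
  | zero =>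
    have h0 : PySem.Chars.rfind.go s [c] 0 = if [c].isPrefixOf s then 0 else -1 := by
      simp [PySem.Chars.rfind.go]
    rw [h0]
    have h00 := isPrefixOf_singleton_drop s c 0
    rw [List.drop_zero] at h00
    cases s with
    | nil => simp [lastIdx?]
    | cons a t =>
      by_cases hac : a = c
      · rw [if_pos (h00.mpr (by simp [hac]))]
        simp [lastIdx?, hac]
      · rw [if_neg (fun h => hac (by simpa using h00.mp h))]
        simp [lastIdx?, hac]
  | succ n ih =>
    have hstep : PySem.Chars.rfind.go s [c] (n + 1) =
        if [c].isPrefixOf (s.drop (n + 1)) then ((n : Int) + 1)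
        else PySem.Chars.rfind.go s [c] n := by
      simp [PySem.Chars.rfind.go]
    rw [hstep]
    have htake : s.take (n + 2) = s.take (n + 1) ++ s[n + 1]?.toList := List.take_add_one
    cases hg : s[n + 1]? with
    | some a =>
      have hlen : (s.take (n + 1)).length = n + 1 := by
        obtain ⟨hlt, -⟩ := List.getElem?_eq_some_iff.mp hg
        have : n + 1 < s.length := hlt
        simp [List.length_take]; omega
      rw [show n + 1 + 1 = n + 2 from rfl, htake, hg]
      simp only [Option.toList_some, lastIdx?_append_singleton, hlen]
      by_cases hac : a = c
      · rw [if_pos ((isPrefixOf_singleton_drop s c (n + 1)).mpr (hac ▸ hg))]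
        simp [hac]
      · rw [if_neg (fun h => hac (by simpa [hg] using (isPrefixOf_singleton_drop s c (n + 1)).mp h))]
        simp [hac, ih]
    | none =>
      rw [show n + 1 + 1 = n + 2 from rfl, htake, hg]
      have : ¬ [c].isPrefixOf (s.drop (n + 1)) = true := by
        rw [isPrefixOf_singleton_drop, hg]; simp
      simp only [Option.toList_none, List.append_nil]
      rw [if_neg this]
      exact ih

lemma rfind_singleton (s : List Char) (c : Char) :
    PySem.Chars.rfind s [c] =
      (match lastIdx? s c with
       | some k => (k : Int)
       | none => -1) := by
  show PySem.Chars.rfind.go s [c] s.length = _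
  rw [rfind_go_spec]
  have : s.take (s.length + 1) = s := List.take_of_length_le (by omega)
  rw [this]

-- A's inner per-row loop, fully characterised
lemma inner_fold_get? (cs : List Char) (c : Char) (i : Int)
    (d : PySem.Dict Char (Int × Int)) (n : Int) :
    ((cs.foldl (fun (p : PySem.Dict Char (Int × Int) × Int) j =>
        (p.1.insert j (i + 2, p.2), p.2 + 1)) (d, n)).1).get? c =
      (match lastIdx? cs c with
       | some k => some (i + 2, n + k)
       | none => d.get? c) := by
  induction cs generalizing d n with
  | nil => simp [lastIdx?]
  | cons a t ih =>
    simp only [List.foldl_cons, lastIdx?]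
    rw [ih]
    cases hl : lastIdx? t c with
    | some k => simp; ring_nf
    | none =>
      by_cases hac : a = c
      · simp [hac, PySem.Dict.get?_insert_self]
      · have hca : c ≠ a := fun h => hac h.symm
        simp [PySem.Dict.get?_insert, hca, hac]

-- findLast over (index, row) pairs: the last row containing c wins, with c's last index in it
def findLast : List (Int × String) → Char → Option (Int × Nat)
  | [], _ => none
  | (i, s) :: t, c =>
    match findLast t c with
    | some r => some r
    | none => (lastIdx? s.toList c).map (fun k => (i, k))

lemma outer_fold_get? (rows : List (Int × String)) (c : Char)
    (d : PySem.Dict Char (Int × Int)) :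
    ((rows.foldl (fun d p =>
        ((p.2.toList.foldl (fun (q : PySem.Dict Char (Int × Int) × Int) j =>
            (q.1.insert j (p.1 + 2, q.2), q.2 + 1)) (d, 1)).1)) d).get? c) =
      (match findLast rows c with
       | some r => some (r.1 + 2, 1 + (r.2 : Int))
       | none => d.get? c) := by
  induction rows generalizing d with
  | nil => simp [findLast]
  | cons p t ih =>
    obtain ⟨i, s⟩ := p
    simp only [List.foldl_cons, findLast]
    rw [ih]
    cases hf : findLast t c with
    | some r => simp
    | none =>
      simp only
      rw [inner_fold_get?]
      cases hl : lastIdx? s.toList c <;> simp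

lemma pressesAux_append (xs : List String) (s : String) (c : Char) :
    pressesAux (xs ++ [s]) c =
      (match pressesAux xs c with
       | some v => some v
       | none => if PySem.Str.rfind s (String.ofList [c]) ≠ -1
                 then some (PySem.Str.rfind s (String.ofList [c]) + 1) else none) := by
  induction xs with
  | nil => simp [pressesAux]
  | cons r t ih =>
    simp only [List.cons_append, pressesAux]
    by_cases h : PySem.Chars.rfind r.toList [c] = -1
    · simp [h, ih]
    · simp [h]

lemma pressesAux_eq_findLast (rows : List (Int × String)) (c : Char) :
    pressesAux ((rows.map (·.2)).reverse) c =
      (findLast rows c).map (fun r => (r.2 : Int) + 1) := by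
  induction rows with
  | nil => simp [pressesAux, findLast]
  | cons p t ih =>
    obtain ⟨i, s⟩ := p
    simp only [List.map_cons, List.reverse_cons, findLast]
    rw [pressesAux_append, ih]
    cases hf : findLast t c with
    | some r => simp
    | none =>
      simp only [Option.map_none]
      have hr := rfind_singleton s.toList c
      cases hl : lastIdx? s.toList c with
      | some k =>
        rw [hl] at hr
        simp [hr]
      | none =>
        rw [hl] at hr
        simpa using hr

lemma mobileKeys_get? (l : List String) (c : Char) :
    ((mobileKeys l).get? c).map (·.2) = pressesAux l.reverse c := by
  have henum : mobileKeys l =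
      (PySem.List.enumerate l 0).foldl (fun d p =>
        ((p.2.toList.foldl (fun (q : PySem.Dict Char (Int × Int) × Int) j =>
            (q.1.insert j (p.1 + 2, q.2), q.2 + 1)) (d, 1)).1)) PySem.Dict.empty := by
    rw [PySem.List.enumerate_eq_map_pyRange l "", List.foldl_map]
    simp [mobileKeys, PySem.List.pyGetD]
  rw [henum, outer_fold_get?]
  have hmap : ((PySem.List.enumerate l 0).map (·.2)) = l := PySem.List.map_snd_enumerate l 0
  conv_rhs => rw [← hmap]
  rw [pressesAux_eq_findLast]
  cases findLast (PySem.List.enumerate l 0) c <;> simp [PySem.Dict.get?_empty, Int.add_comm]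

-- ===== VERDICT (by name: the statement is the Claim_ definition above) =====
theorem key_count_spec : Claim_equal_key_count := by
  intro l sms _ _
  unfold Spec_key_count key_count key_count_alt
  congr 1
  funext n ch
  by_cases h : ch = ' '
  · simp [h]
  · have := mobileKeys_get? l ch
    simp only [h, ite_not]
    cases hg : (mobileKeys l).get? ch with
    | none => simp [hg] at this; simp [← this]
    | some v => simp [hg] at this; simp [← this]
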